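-- pv_equiv track=rewrite | github.com/Tythos/SeRes | bu/serial - Copy.py | get_tabular_dicts
-- ===== SOURCE A (Python) =====
-- def get_tabular_dicts(dicts):
-- 	# Given an array of dictionary representations of serialized objects, returns a
-- 	# similar array with indentical fields for each entry that will be empty when
-- 	# irrelevant (None values are used for empty fields). Fields are also re-ordered
-- 	# for consistent organization between objects. This is particularly useful for
-- 	# outbound methods of tabular formats, which only have one header row for all entries.
-- 	all_fields = []
-- 	for d in dicts:
-- 		for k in d.keys():
-- 			if k not in all_fields:
-- 				all_fields.append(k)
-- 	all_fields.sort()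
-- 	tdicts = []
-- 	for d in dicts:
-- 		nd = {}
-- 		for f in all_fields:
-- 			if f in d:
-- 				nd[f] = d[f]
-- 			else:
-- 				nd[f] = None
-- 		tdicts.append(nd)
-- 	return tdicts
-- ===== SOURCE B (Python) =====
-- def get_tabular_dicts(dicts):
--     # Sort-and-merge: dedupe the sorted key multiset by adjacency, then build each
--     # row by a two-pointer merge of the dict's sorted items against the field list
--     # (no membership tests and no per-field dict lookups).
--     keys = sorted(k for d in dicts for k in d)
--     all_fields = []
--     for k in keys:
--         if not all_fields or all_fields[-1] != k:
--             all_fields.append(k)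
--     out = []
--     for d in dicts:
--         items = sorted(d.items(), key=lambda kv: kv[0])
--         row = {}
--         j = 0
--         for f in all_fields:
--             if j < len(items) and items[j][0] == f:
--                 row[f] = items[j][1]
--                 j += 1
--             else:
--                 row[f] = None
--         out.append(row)
--     return out
-- ===== Notes on version B (the rewrite author's own statement) =====
-- stated objective: faster
-- what changed: Replaces A's membership-test union and per-field dict lookups by sort-and-merge: the field list is the adjacent dedup of the sorted concatenation of all keys, and each row is built by a two-pointer merge of the dict's key-sorted items against that field list, with no membership tests or per-field lookups.
import Mathlib
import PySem

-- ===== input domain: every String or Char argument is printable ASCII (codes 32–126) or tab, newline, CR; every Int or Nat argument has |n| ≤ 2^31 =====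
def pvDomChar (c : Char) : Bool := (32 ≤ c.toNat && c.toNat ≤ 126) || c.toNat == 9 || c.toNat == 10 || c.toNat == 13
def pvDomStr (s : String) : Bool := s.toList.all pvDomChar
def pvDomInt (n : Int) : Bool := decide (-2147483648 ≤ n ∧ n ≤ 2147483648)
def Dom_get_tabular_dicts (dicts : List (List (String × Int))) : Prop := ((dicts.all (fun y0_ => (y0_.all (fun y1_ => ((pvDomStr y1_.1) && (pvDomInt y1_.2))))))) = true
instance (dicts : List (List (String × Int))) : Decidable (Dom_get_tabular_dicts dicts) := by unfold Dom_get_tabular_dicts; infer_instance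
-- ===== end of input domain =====

-- B replaces A's membership-test union and per-field dict lookups by sort-and-merge:
-- adjacent dedup of the sorted key multiset, then a two-pointer merge per row.

-- ===== PORT A =====
def get_tabular_dicts (dicts : List (List (String × Int))) : List (List (String × Option Int)) :=
  let all_fields : List String :=
    dicts.foldl (fun af d =>
      (PySem.Dict.mk d).keys.foldl (fun af k => if k ∈ af then af else af ++ [k]) af) []
  let all_fields := PySem.List.sorted all_fields (fun x => x) false
  dicts.foldl (fun tdicts d =>
    tdicts ++ [(all_fields.foldl (fun nd f =>
        if (PySem.Dict.mk d).contains f then nd.insert f (PySem.Dict.get? (PySem.Dict.mk d) f)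
        else nd.insert f none)
      (PySem.Dict.empty : PySem.Dict String (Option Int))).items]) []

-- ===== PORT B =====
def get_tabular_dicts_alt (dicts : List (List (String × Int))) : List (List (String × Option Int)) :=
  let keys : List String :=            -- sorted(k for d in dicts for k in d)
    PySem.List.sorted (dicts.flatMap (fun d => (PySem.Dict.mk d).keys)) (fun x => x) false
  let all_fields : List String :=      -- adjacent dedup: append k unless it equals the last entry
    keys.foldl (fun af k =>
      if af = [] ∨ ¬ (PySem.List.pyGet? af (-1) = some k) then af ++ [k] else af) []
  dicts.foldl (fun out d =>
    let items := PySem.List.sorted (PySem.Dict.mk d).items (fun kv => kv.1) false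
    out ++ [(all_fields.foldl (fun (rj : PySem.Dict String (Option Int) × Nat) f =>
        match items[rj.2]? with      -- j < len(items) and items[j][0] == f
        | some kv =>
          if kv.1 = f then (rj.1.insert f (some kv.2), rj.2 + 1)
          else (rj.1.insert f none, rj.2)
        | none => (rj.1.insert f none, rj.2))
      ((PySem.Dict.empty : PySem.Dict String (Option Int)), 0)).1.items]) []

-- ===== PRECONDITION & SPEC =====
-- The inner association lists model Python dicts, which cannot hold duplicate keys;
-- Pre_ excludes duplicate-key lists, on which the assoc-list reading of a dict is
-- ambiguous (first-match vs last-wins) and no Python input corresponds to them.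
def Pre_get_tabular_dicts (dicts : List (List (String × Int))) : Prop :=
  ∀ d ∈ dicts, (d.map (fun p => p.1)).Nodup
instance (dicts : List (List (String × Int))) : Decidable (Pre_get_tabular_dicts dicts) := by
  unfold Pre_get_tabular_dicts; infer_instance
def pvWitness_get_tabular_dicts : (List (List (String × Int))) := [[("b", 1), ("a", 2)], [("c", 3)]]

def Spec_get_tabular_dicts (dicts : List (List (String × Int))) (out : List (List (String × Option Int))) : Prop := out = get_tabular_dicts_alt dicts
instance (dicts : List (List (String × Int))) (out : List (List (String × Option Int))) : Decidable (Spec_get_tabular_dicts dicts out) := by unfold Spec_get_tabular_dicts; infer_instance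

-- ===== CLAIM (what is proved, stated in full; the proofs are below) =====
def Claim_equal_get_tabular_dicts : Prop := ∀ (dicts : List (List (String × Int))), Dom_get_tabular_dicts dicts → Pre_get_tabular_dicts dicts → Spec_get_tabular_dicts dicts (get_tabular_dicts dicts)

-- ===== LEMMAS AND PROOFS =====

-- Folding a union over key lists equals folding over their concatenation.
lemma pv_foldl_flat (l : List (List (String × Int))) (s : PySem.Set String) :
    l.foldl (fun af d => (PySem.Dict.mk d).keys.foldl PySem.Set.add af) s
      = (l.flatMap (fun d => (PySem.Dict.mk d).keys)).foldl PySem.Set.add s := by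
  induction l generalizing s with
  | nil => rfl
  | cons d rest ih => rw [List.foldl_cons, List.flatMap_cons, List.foldl_append, ih]

-- Folding fresh-key inserts appends the corresponding items in order.
lemma pv_items_foldl_insert (S : List String) (v : String → Option Int)
    (b : PySem.Dict String (Option Int)) (hnd : S.Nodup) (hfresh : ∀ f ∈ S, f ∉ b.keys) :
    (S.foldl (fun nd f => nd.insert f (v f)) b).items
      = b.items ++ S.map (fun f => (f, v f)) := by
  induction S generalizing b with
  | nil => simp
  | cons f S ih =>
    have hc : b.contains f = false := by
      rcases h : b.contains f with _ | _
      · rfl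
      · exact ((hfresh f (by simp)) ((PySem.Dict.contains_iff_mem_keys b f).mp h)).elim
    have hins : (b.insert f (v f)).items = b.items ++ [(f, v f)] := by
      simp [PySem.Dict.insert, hc]
    have hkeys : (b.insert f (v f)).keys = b.keys ++ [f] := by
      simp [PySem.Dict.keys, hins]
    rw [List.foldl_cons, ih (b.insert f (v f)) hnd.of_cons]
    · simp [hins]
    · intro g hg
      rw [hkeys]
      simp only [List.mem_append, List.mem_singleton]
      rintro (h1 | rfl)
      · exact hfresh g (by simp [hg]) h1
      · exact (List.nodup_cons.mp hnd).1 hg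

-- Adjacent dedup with the last emitted element as state (proof-side model of B's loop).
def pvDedupFrom : Option String → List String → List String
  | _, [] => []
  | p, k :: ks => if some k = p then pvDedupFrom p ks else k :: pvDedupFrom (some k) ks

-- B's dedup loop is pvDedupFrom of the accumulator's last element.
lemma pv_foldl_dedup (ks : List String) (acc : List String) :
    ks.foldl (fun af k =>
        if af = [] ∨ ¬ (PySem.List.pyGet? af (-1) = some k) then af ++ [k] else af) acc
      = acc ++ pvDedupFrom acc.getLast? ks := by
  induction ks generalizing acc with
  | nil => simp [pvDedupFrom]
  | cons k ks ih =>
    rw [List.foldl_cons]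
    by_cases h : acc.getLast? = some k
    · have hne : acc ≠ [] := by intro hnil; simp [hnil] at h
      have : ¬ (acc = [] ∨ ¬ (PySem.List.pyGet? acc (-1) = some k)) := by
        simp [PySem.List.pyGet?_neg_one, h, hne]
      rw [if_neg this, ih, pvDedupFrom, if_pos h.symm, h]
    · have : acc = [] ∨ ¬ (PySem.List.pyGet? acc (-1) = some k) := by
        rcases eq_or_ne acc [] with h0 | h0
        · exact Or.inl h0
        · exact Or.inr (by simpa [PySem.List.pyGet?_neg_one] using h)
      rw [if_pos this, ih, pvDedupFrom, if_neg (fun he => h he.symm)]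
      simp [List.getLast?_append]
  -- (List.getLast?_append : getLast? (acc ++ [k]) = some k up to simp normal form)

-- Membership through pvDedupFrom on a ≤-sorted list with a lower bound.
lemma pv_dedupFrom_mem (l : List String) (q : String) (x : String)
    (hl : l.Pairwise (· ≤ ·)) (hq : ∀ y ∈ l, q ≤ y) :
    x ∈ pvDedupFrom (some q) l ↔ x ∈ l ∧ x ≠ q := by
  induction l generalizing q with
  | nil => simp [pvDedupFrom]
  | cons k ks ih =>
    have hks : ks.Pairwise (· ≤ ·) := hl.of_cons
    have hkle : ∀ y ∈ ks, k ≤ y := (List.pairwise_cons.mp hl).1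
    rw [pvDedupFrom]
    by_cases h : some k = some q
    · have hkq : k = q := by injection h
      rw [if_pos h, ih q hks (by intro y hy; exact hq y (by simp [hy]))]
      subst hkq
      constructor
      · rintro ⟨h1, h2⟩; exact ⟨by simp [h1], h2⟩
      · rintro ⟨h1, h2⟩
        rcases List.mem_cons.mp h1 with rfl | h1
        · exact (h2 rfl).elim
        · exact ⟨h1, h2⟩
    · have hkq : k ≠ q := fun he => h (by rw [he])
      have hqk : q < k := lt_of_le_of_ne (hq k (by simp)) (Ne.symm hkq)
      rw [if_neg h]
      constructor
      · intro hx
        rcases List.mem_cons.mp hx with rfl | hx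
        · exact ⟨by simp, hkq⟩
        · have := (ih k hks hkle).mp hx
          exact ⟨by simp [this.1], fun he => absurd (hkle x this.1) (by subst he; exact not_le.mpr hqk)⟩
      · rintro ⟨hx, hxq⟩
        rcases List.mem_cons.mp hx with rfl | hx
        · exact List.mem_cons_self
        · by_cases hxk : x = k
          · subst hxk; exact List.mem_cons_self
          · exact List.mem_cons.mpr (Or.inr ((ih k hks hkle).mpr ⟨hx, hxk⟩))

-- pvDedupFrom of a ≤-sorted list is strictly increasing and stays above the bound.
lemma pv_dedupFrom_strict (l : List String) (q : String)
    (hl : l.Pairwise (· ≤ ·)) (hq : ∀ y ∈ l, q ≤ y) :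
    (pvDedupFrom (some q) l).Pairwise (· < ·) ∧ ∀ x ∈ pvDedupFrom (some q) l, q < x := by
  induction l generalizing q with
  | nil => simp [pvDedupFrom]
  | cons k ks ih =>
    have hks : ks.Pairwise (· ≤ ·) := hl.of_cons
    have hkle : ∀ y ∈ ks, k ≤ y := (List.pairwise_cons.mp hl).1
    rw [pvDedupFrom]
    by_cases h : some k = some q
    · have hkq : k = q := by injection h
      rw [if_pos h]
      exact ih q hks (by intro y hy; exact hkq ▸ hkle y hy)
    · have hqk : q < k := lt_of_le_of_ne (hq k (by simp)) (fun he => h (by rw [he]))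
      rw [if_neg h]
      obtain ⟨hp, hb⟩ := ih k hks hkle
      refine ⟨List.pairwise_cons.mpr ⟨hb, hp⟩, ?_⟩
      intro x hx
      rcases List.mem_cons.mp hx with rfl | hx
      · exact hqk
      · exact lt_trans hqk (hb x hx)

-- Top level of the dedup: first element always emitted.
lemma pv_dedupFrom_none (l : List String) (hl : l.Pairwise (· ≤ ·)) :
    (pvDedupFrom none l).Pairwise (· < ·) ∧ ∀ x, x ∈ pvDedupFrom none l ↔ x ∈ l := by
  cases l with
  | nil => simp [pvDedupFrom]
  | cons k ks =>
    have hks : ks.Pairwise (· ≤ ·) := hl.of_cons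
    have hkle : ∀ y ∈ ks, k ≤ y := (List.pairwise_cons.mp hl).1
    rw [pvDedupFrom, if_neg (by simp)]
    obtain ⟨hp, hb⟩ := pv_dedupFrom_strict ks k hks hkle
    refine ⟨List.pairwise_cons.mpr ⟨hb, hp⟩, ?_⟩
    intro x
    rw [List.mem_cons, List.mem_cons, pv_dedupFrom_mem ks k x hks hkle]
    constructor
    · rintro (rfl | ⟨h1, _⟩)
      · exact Or.inl rfl
      · exact Or.inr h1
    · rintro (rfl | h1)
      · exact Or.inl rfl
      · by_cases hxk : x = k
        · exact Or.inl hxk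
        · exact Or.inr ⟨h1, hxk⟩

-- B's dedup of the sorted key multiset IS A's sorted set of keys.
lemma pv_fields_eq (L : List String) :
    pvDedupFrom none (PySem.List.sorted L (fun x => x) false)
      = PySem.List.sorted (PySem.Set.ofList L) (fun x => x) false := by
  have hsle : (PySem.List.sorted L (fun x => x) false).Pairwise (· ≤ ·) :=
    PySem.List.sorted_pairwise L (fun x => x)
  obtain ⟨hlt, hmem⟩ := pv_dedupFrom_none _ hsle
  refine Eq.symm (PySem.List.sorted_eq_of_perm_of_pairwise_lt _ _ (fun x => x) ?_ hlt)
  have hnd : (pvDedupFrom none (PySem.List.sorted L (fun x => x) false)).Nodup :=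
    hlt.nodup
  refine (List.perm_ext_iff_of_nodup hnd (PySem.Set.nodup_ofList L)).mpr ?_
  intro x
  rw [hmem, PySem.List.mem_sorted, PySem.Set.mem_ofList]

-- Value B's two-pointer merge assigns to a field: first (unique) match in the items.
def pvLook (l : List (String × Int)) (f : String) : Option Int :=
  (l.find? (fun kv => kv.1 == f)).map (fun kv => kv.2)

-- The two-pointer merge writes pvLook of the unscanned suffix for every field.
lemma pv_merge (S : List String) (items : List (String × Int)) (j : Nat)
    (row : PySem.Dict String (Option Int))
    (hS : S.Pairwise (· < ·))
    (hit : (items.drop j).Pairwise (fun a b => a.1 < b.1))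
    (hsub : ∀ kv ∈ items.drop j, kv.1 ∈ S)
    (hfresh : ∀ f ∈ S, f ∉ row.keys) :
    (S.foldl (fun (rj : PySem.Dict String (Option Int) × Nat) f =>
        match items[rj.2]? with
        | some kv =>
          if kv.1 = f then (rj.1.insert f (some kv.2), rj.2 + 1)
          else (rj.1.insert f none, rj.2)
        | none => (rj.1.insert f none, rj.2)) (row, j)).1.items
      = row.items ++ S.map (fun f => (f, pvLook (items.drop j) f)) := by
  induction S generalizing j row with
  | nil => simp
  | cons f S ih =>
    have hSlt : ∀ g ∈ S, f < g := (List.pairwise_cons.mp hS).1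
    have hS' : S.Pairwise (· < ·) := hS.of_cons
    have hfS : f ∉ S := fun hf => lt_irrefl f (hSlt f hf)
    have hfresh' : ∀ v : Option Int, ∀ g ∈ S, g ∉ (row.insert f v).keys := by
      intro v g hg
      rw [PySem.Dict.mem_keys_insert]
      rintro (rfl | hk)
      · exact hfS hg
      · exact hfresh g (by simp [hg]) hk
    have hrowc : ∀ v : Option Int, (row.insert f v).items = row.items ++ [(f, v)] := by
      intro v
      have hc : row.contains f = false := by
        rcases h : row.contains f with _ | _
        · rfl
        · exact ((hfresh f (by simp)) ((PySem.Dict.contains_iff_mem_keys row f).mp h)).elim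
      simp [PySem.Dict.insert, hc]
    rw [List.foldl_cons]
    rcases hj : items[j]? with _ | kv
    · -- past the end: suffix is empty
      have hdrop : items.drop j = [] := by
        have := List.getElem?_eq_none_iff.mp hj
        simp [List.drop_eq_nil_iff]; omega
      simp only []
      rw [ih j (row.insert f none) hS' (by simp [hdrop]) (by simp [hdrop]) (hfresh' none)]
      simp [hrowc, pvLook, hdrop]
    · have hjlt : j < items.length := (List.getElem?_eq_some_iff.mp hj).1
      have hdrop : items.drop j = kv :: items.drop (j + 1) := by
        rw [List.drop_eq_getElem_cons hjlt]
        congr 1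
        exact (List.getElem?_eq_some_iff.mp hj).2
      have hkvS : kv.1 ∈ f :: S := hsub kv (by rw [hdrop]; exact List.mem_cons_self)
      have htail : (items.drop (j + 1)).Pairwise (fun a b => a.1 < b.1) := by
        rw [hdrop] at hit; exact hit.of_cons
      have hgt : ∀ x ∈ items.drop (j + 1), kv.1 < x.1 := by
        rw [hdrop] at hit; exact (List.pairwise_cons.mp hit).1
      by_cases hkf : kv.1 = f
      · -- match: consume the item
        have hsub' : ∀ x ∈ items.drop (j + 1), x.1 ∈ S := by
          intro x hx
          rcases List.mem_cons.mp (hsub x (by rw [hdrop]; exact List.mem_cons.mpr (Or.inr hx))) with he | h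
          · exact absurd (hgt x hx) (by rw [he, hkf]; exact lt_irrefl f)
          · exact h
        have hstep : (List.foldl (fun (rj : PySem.Dict String (Option Int) × Nat) f =>
            match items[rj.2]? with
            | some kv =>
              if kv.1 = f then (rj.1.insert f (some kv.2), rj.2 + 1)
              else (rj.1.insert f none, rj.2)
            | none => (rj.1.insert f none, rj.2))
            (row.insert f (some kv.2), j + 1) S).1.items
            = (row.insert f (some kv.2)).items
              ++ S.map (fun g => (g, pvLook (items.drop (j + 1)) g)) :=
          ih (j + 1) (row.insert f (some kv.2)) hS' htail hsub' (hfresh' _)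
        simp only []
        rw [if_pos hkf, hstep, hrowc, List.append_assoc]
        congr 1
        have hfind : pvLook (items.drop j) f = some kv.2 := by
          rw [hdrop, pvLook, List.find?_cons_of_pos (by simp [hkf])]
          rfl
        rw [List.map_cons, List.singleton_append, hfind]
        congr 1
        refine List.map_congr_left (fun g hg => ?_)
        have : pvLook (items.drop j) g = pvLook (items.drop (j + 1)) g := by
          rw [hdrop, pvLook, pvLook, List.find?_cons_of_neg]
          simp only [beq_iff_eq, hkf]
          exact fun he => lt_irrefl g (he ▸ hSlt g hg)
        rw [this]
      · -- no match: field absent from the dict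
        have hkvS' : kv.1 ∈ S := by
          rcases List.mem_cons.mp hkvS with he | h
          · exact (hkf he).elim
          · exact h
        have hfkv : f < kv.1 := hSlt kv.1 hkvS'
        have hsub' : ∀ x ∈ items.drop j, x.1 ∈ S := by
          intro x hx
          rcases List.mem_cons.mp (hsub x hx) with he | h
          · exfalso
            rw [hdrop] at hx
            rcases List.mem_cons.mp hx with rfl | hx
            · exact hkf he
            · exact absurd (hgt x hx) (by rw [he]; exact not_lt.mpr (le_of_lt hfkv))
          · exact h
        have hstep : (List.foldl (fun (rj : PySem.Dict String (Option Int) × Nat) f =>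
            match items[rj.2]? with
            | some kv =>
              if kv.1 = f then (rj.1.insert f (some kv.2), rj.2 + 1)
              else (rj.1.insert f none, rj.2)
            | none => (rj.1.insert f none, rj.2))
            (row.insert f none, j) S).1.items
            = (row.insert f none).items ++ S.map (fun g => (g, pvLook (items.drop j) g)) :=
          ih j (row.insert f none) hS' hit hsub' (hfresh' none)
        simp only []
        rw [if_neg hkf, hstep, hrowc, List.append_assoc]
        congr 1
        have hfind : pvLook (items.drop j) f = none := by
          rw [hdrop, pvLook, List.find?_cons_of_neg (by simp [fun he : kv.1 = f => hkf he])]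
          rw [List.find?_eq_none.mpr]
          · rfl
          · intro x hx
            simp only [beq_iff_eq]
            exact fun he => absurd (hgt x hx) (by rw [he]; exact not_lt.mpr (le_of_lt hfkv))
        rw [List.map_cons, List.singleton_append, hfind]

-- pvLook of the sorted items is the dict lookup (unique keys).
lemma pv_look_get (d : List (String × Int)) (f : String)
    (hnd : (d.map (fun p => p.1)).Nodup) :
    pvLook (PySem.List.sorted d (fun kv => kv.1) false) f = PySem.Dict.get? (PySem.Dict.mk d) f := by
  have hperm : (PySem.List.sorted d (fun kv => kv.1) false).Perm d :=
    PySem.List.sorted_perm d _ false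
  have hkeys : (PySem.Dict.mk d).keys = d.map (fun p => p.1) := rfl
  rcases hg : PySem.Dict.get? (PySem.Dict.mk d) f with _ | v
  · -- f not a key: no match anywhere
    have hnk : f ∉ d.map (fun p => p.1) := by
      rw [← hkeys]
      exact (PySem.Dict.get?_eq_none_iff_not_mem_keys _ _).mp hg
    rw [pvLook, List.find?_eq_none.mpr]
    · rfl
    · intro kv hkv
      simp only [beq_iff_eq]
      intro he
      exact hnk (List.mem_map.mpr ⟨kv, hperm.mem_iff.mp hkv, he⟩)
  · -- f ↦ v: the unique pair (f, v) is found
    have hmem : (f, v) ∈ d :=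
      PySem.Dict.mem_items_of_get?_eq_some (d := PySem.Dict.mk d) hg
    have hsome : ((PySem.List.sorted d (fun kv => kv.1) false).find?
        (fun kv => kv.1 == f)).isSome := by
      rw [List.find?_isSome]
      exact ⟨(f, v), hperm.mem_iff.mpr hmem, by simp⟩
    rcases hf : (PySem.List.sorted d (fun kv => kv.1) false).find? (fun kv => kv.1 == f)
      with _ | kv
    · rw [hf] at hsome; simp at hsome
    · have hkvmem : kv ∈ d := hperm.mem_iff.mp (List.mem_of_find?_eq_some hf)
      have hkvf : kv.1 = f := by simpa using List.find?_some hf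
      -- unique key: kv = (f, v)
      have : kv.2 = v := by
        have h1 : PySem.Dict.get? (PySem.Dict.mk d) kv.1 = some kv.2 :=
          PySem.Dict.get?_of_mem_items (d := PySem.Dict.mk d) (k := kv.1) (v := kv.2)
            (by simpa using hkvmem) (by simpa [hkeys] using hnd)
      -- rewrite with hkvf and compare with hg
        rw [hkvf, hg] at h1
        injection h1 with h1
        exact h1.symm
      rw [pvLook, hf, Option.map_some, this]

-- ===== VERDICT (by name: the statement is the Claim_ definition above) =====
theorem get_tabular_dicts_spec : Claim_equal_get_tabular_dicts := by
  intro dicts _ hpre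
  unfold Spec_get_tabular_dicts get_tabular_dicts get_tabular_dicts_alt
  simp only []
  have hfun : (fun (af : List String) k => if k ∈ af then af else af ++ [k]) = PySem.Set.add := by
    funext af k; rw [PySem.Set.add_eq_ite]
  set L := dicts.flatMap (fun d => (PySem.Dict.mk d).keys) with hL
  have hfieldsA :
      dicts.foldl (fun af d =>
        (PySem.Dict.mk d).keys.foldl (fun af k => if k ∈ af then af else af ++ [k]) af) []
      = PySem.Set.ofList L := by
    rw [hfun, PySem.Set.ofList, pv_foldl_flat]
    rfl
  have hfieldsB :
      (PySem.List.sorted L (fun x => x) false).foldl (fun af k =>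
          if af = [] ∨ ¬ (PySem.List.pyGet? af (-1) = some k) then af ++ [k] else af) []
      = PySem.List.sorted (PySem.Set.ofList L) (fun x => x) false := by
    rw [pv_foldl_dedup, List.nil_append]
    simpa using pv_fields_eq L
  rw [hfieldsA, hfieldsB]
  set S := PySem.List.sorted (PySem.Set.ofList L) (fun x => x) false with hSdef
  have hSlt : S.Pairwise (· < ·) := by
    rw [hSdef]; exact PySem.List.sorted_ofList_pairwise_lt L
  have hSnd : S.Nodup := hSlt.nodup
  rw [PySem.List.foldl_append_singleton_eq_map
    (f := fun d => (S.foldl (fun nd f =>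
        if (PySem.Dict.mk d).contains f then nd.insert f (PySem.Dict.get? (PySem.Dict.mk d) f)
        else nd.insert f none)
      (PySem.Dict.empty : PySem.Dict String (Option Int))).items)]
  rw [PySem.List.foldl_append_singleton_eq_map
    (f := fun d => (S.foldl (fun (rj : PySem.Dict String (Option Int) × Nat) f =>
        match (PySem.List.sorted (PySem.Dict.mk d).items (fun kv => kv.1) false)[rj.2]? with
        | some kv =>
          if kv.1 = f then (rj.1.insert f (some kv.2), rj.2 + 1)
          else (rj.1.insert f none, rj.2)
        | none => (rj.1.insert f none, rj.2))
      ((PySem.Dict.empty : PySem.Dict String (Option Int)), 0)).1.items)]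
  simp only [List.nil_append]
  refine List.map_congr_left (fun d hd => ?_)
  have hnd : (d.map (fun p => p.1)).Nodup := hpre d hd
  have hdd : (PySem.Dict.mk d).items = d := rfl
  set items := PySem.List.sorted d (fun kv => kv.1) false with hitems
  -- A's row: fold over S with dict lookups
  have hfunA : (fun (nd : PySem.Dict String (Option Int)) f =>
      if (PySem.Dict.mk d).contains f then nd.insert f (PySem.Dict.get? (PySem.Dict.mk d) f)
      else nd.insert f none)
      = fun nd f => nd.insert f (PySem.Dict.get? (PySem.Dict.mk d) f) := by
    funext nd f
    rcases h : (PySem.Dict.mk d).contains f with _ | _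
    · simp [(PySem.Dict.get?_eq_none_iff_contains _ f).mpr h]
    · rfl
  have hempty : ∀ f ∈ S, f ∉ (PySem.Dict.empty : PySem.Dict String (Option Int)).keys := by
    intro f _; simp [PySem.Dict.empty, PySem.Dict.keys]
  have hA : (S.foldl (fun nd f =>
      if (PySem.Dict.mk d).contains f then nd.insert f (PySem.Dict.get? (PySem.Dict.mk d) f)
      else nd.insert f none) (PySem.Dict.empty : PySem.Dict String (Option Int))).items
      = S.map (fun f => (f, PySem.Dict.get? (PySem.Dict.mk d) f)) := by
    rw [hfunA]
    simpa [PySem.Dict.empty] using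
      pv_items_foldl_insert S (fun f => PySem.Dict.get? (PySem.Dict.mk d) f)
        PySem.Dict.empty hSnd hempty
  -- B's row: the two-pointer merge
  have hitlt : items.Pairwise (fun a b : String × Int => a.1 < b.1) := by
    have hitkeys : (items.map (fun kv => kv.1)).Nodup :=
      (((PySem.List.sorted_perm d _ false).map _).nodup_iff).mpr hnd
    have hne : items.Pairwise (fun a b : String × Int => a.1 ≠ b.1) :=
      List.pairwise_map.mp hitkeys
    have hitle : items.Pairwise (fun a b : String × Int => a.1 ≤ b.1) := by
      rw [hitems]; exact PySem.List.sorted_pairwise d _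
    exact (hitle.and hne).imp (fun h => lt_of_le_of_ne h.1 h.2)
  have hsub : ∀ kv ∈ items, kv.1 ∈ S := by
    intro kv hkv
    rw [hSdef, PySem.List.mem_sorted, PySem.Set.mem_ofList, hL]
    refine List.mem_flatMap.mpr ⟨d, hd, ?_⟩
    simp only [PySem.Dict.keys, List.mem_map]
    exact ⟨kv, (PySem.List.sorted_perm d _ false).mem_iff.mp hkv, rfl⟩
  have hB := pv_merge S items 0 PySem.Dict.empty hSlt (by simpa using hitlt)
    (by simpa using hsub) hempty
  simp only [List.drop_zero] at hB
  rw [hB, hA]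
  simp only [PySem.Dict.empty, List.nil_append]
  refine List.map_congr_left (fun f _ => ?_)
  rw [pv_look_get d f hnd]
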